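-- pv_equiv track=rewrite | github.com/KRITHIKR007/SIH_ALPHA01 | pipelines/pipeline_connector.py | _apply_phonics_processing
-- ===== SOURCE A (Python) =====
-- def _apply_phonics_processing(text: str) -> str:
--     """Apply phonics-friendly text processing"""
--     # Add pauses between syllables for complex words
--     words = text.split()
--     processed_words = []
--
--     for word in words:
--         if len(word) > 6:  # Complex word
--             # Simple syllable break heuristic
--             processed_word = ""
--             for i, char in enumerate(word):
--                 processed_word += char
--                 if i > 0 and i % 3 == 0 and i < len(word) - 1:
--                     processed_word += " "  # Add slight pause
--             processed_words.append(processed_word)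
--         else:
--             processed_words.append(word)
--
--     return " ".join(processed_words)
-- ===== SOURCE B (Python) =====
-- def _apply_phonics_processing(text: str) -> str:
--     """Apply phonics-friendly text processing (chunk-slicing re-implementation)"""
--     processed_words = []
--     for word in text.split():
--         if len(word) > 6:  # Complex word: first 4 chars, then 3-char chunks
--             chunks = [word[:4]] + [word[i:i + 3] for i in range(4, len(word), 3)]
--             processed_words.append(" ".join(chunks))
--         else:
--             processed_words.append(word)
--     return " ".join(processed_words)
-- ===== Notes on version B (the rewrite author's own statement) =====
-- stated objective: idiomatic
-- what changed: Long words are processed by slice-based chunking (word[:4] followed by 3-char slices word[i:i+3], joined with spaces) instead of the per-character accumulate-and-test-modulo loop.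
import Mathlib
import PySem

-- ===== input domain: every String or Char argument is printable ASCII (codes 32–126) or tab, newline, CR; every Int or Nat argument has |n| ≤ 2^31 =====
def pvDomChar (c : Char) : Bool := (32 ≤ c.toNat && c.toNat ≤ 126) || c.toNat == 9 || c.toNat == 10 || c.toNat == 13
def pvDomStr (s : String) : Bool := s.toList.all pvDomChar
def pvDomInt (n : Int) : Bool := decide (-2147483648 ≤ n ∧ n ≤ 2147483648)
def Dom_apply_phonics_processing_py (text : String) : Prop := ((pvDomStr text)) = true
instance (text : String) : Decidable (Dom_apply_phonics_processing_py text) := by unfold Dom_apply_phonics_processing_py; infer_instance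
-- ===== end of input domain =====

-- B replaces A's per-character accumulate-and-test-modulo loop by slice-based chunking
-- (word[:4] then 3-char slices joined with spaces); objective: idiomatic. Both are total.

-- ===== PORT A =====
-- per-word processing of A: char-by-char loop over enumerate(word), appending a space
-- after index i when i > 0 and i % 3 == 0 and i < len(word) - 1
def pvProcWordA (w : List Char) : List Char :=
  if PySem.Chars.len w > 6 then
    (PySem.List.enumerate w 0).foldl
      (fun acc p =>
        let acc' := acc ++ [p.2]
        if p.1 > 0 ∧ PySem.Int.mod p.1 3 = 0 ∧ p.1 < PySem.Chars.len w - 1 then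
          acc' ++ [' ']
        else acc') []
  else w

def apply_phonics_processing_py (text : String) : String :=
  String.ofList (PySem.Chars.join [' '] ((PySem.Chars.split₀ text.toList).map pvProcWordA))

-- ===== PORT B =====
-- per-word processing of B: chunks = [word[:4]] + [word[i:i+3] for i in range(4, len(word), 3)]
def pvProcWordB (w : List Char) : List Char :=
  if PySem.Chars.len w > 6 then
    PySem.Chars.join [' ']
      (PySem.List.slice w none (some 4) ::
        (PySem.List.pyRange 4 (PySem.Chars.len w) 3).map
          (fun i => PySem.List.slice w (some i) (some (i + 3))))
  else w

def apply_phonics_processing_py_alt (text : String) : String :=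
  String.ofList (PySem.Chars.join [' '] ((PySem.Chars.split₀ text.toList).map pvProcWordB))

-- ===== PRECONDITION & SPEC =====
def Spec_apply_phonics_processing_py (text : String) (out : String) : Prop := out = apply_phonics_processing_py_alt text
instance (text : String) (out : String) : Decidable (Spec_apply_phonics_processing_py text out) := by unfold Spec_apply_phonics_processing_py; infer_instance

-- ===== CLAIM (what is proved, stated in full; the proofs are below) =====
def Claim_equal_apply_phonics_processing_py : Prop := ∀ (text : String), Dom_apply_phonics_processing_py text → Spec_apply_phonics_processing_py text (apply_phonics_processing_py text)

-- ===== LEMMAS AND PROOFS =====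

-- canonical chunk list: groups of 3 characters
def pvGroups3 : List Char → List (List Char)
  | [] => []
  | [a] => [[a]]
  | [a, b] => [[a, b]]
  | a :: b :: c :: rest => [a, b, c] :: pvGroups3 rest

theorem pvGroups3_ne_nil (x : Char) (l : List Char) : pvGroups3 (x :: l) ≠ [] := by
  match l with
  | [] => simp [pvGroups3]
  | [a] => simp [pvGroups3]
  | a :: b :: r => simp [pvGroups3]

-- A's foldl, unrolled to a flatMap
theorem pvFoldA (C : Int × Char → Prop) [DecidablePred C] (l : List (Int × Char)) (acc : List Char) :
    l.foldl (fun acc p =>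
        let acc' := acc ++ [p.2]
        if C p then acc' ++ [' '] else acc') acc
      = acc ++ l.flatMap (fun p => p.2 :: if C p then [' '] else []) := by
  induction l generalizing acc with
  | nil => simp
  | cons p l ih =>
    rw [List.foldl_cons, ih]
    by_cases h : C p <;> simp [h]

-- B's list of 3-char slices is pvGroups3
theorem pvChunksB_eq (v : List Char) :
    (List.range ((v.length + 2) / 3)).map (fun k => ((v.drop (3 * k)).take 3)) = pvGroups3 v := by
  match v with
  | [] => simp [pvGroups3]
  | [a] => simp [pvGroups3, List.range_succ]
  | [a, b] => simp [pvGroups3, List.range_succ]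
  | a :: b :: c :: rest =>
    have hlen : (((a :: b :: c :: rest : List Char).length + 2) / 3) = (rest.length + 2) / 3 + 1 := by
      simp; omega
    rw [hlen, List.range_succ_eq_map, List.map_cons, List.map_map]
    have ih := pvChunksB_eq rest
    have htail : (List.range ((rest.length + 2) / 3)).map
        ((fun k => (((a :: b :: c :: rest : List Char).drop (3 * k)).take 3)) ∘ Nat.succ)
        = pvGroups3 rest := by
      rw [← ih]
      apply List.map_congr_left
      intro k _
      simp only [Function.comp_apply]
      congr 1
    simp only [htail, Nat.mul_zero, List.drop_zero, pvGroups3]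
    rfl

-- A's tail loop (start index s ≡ 1 mod 3, s ≥ 1) produces the space-joined 3-chunks
theorem pvProcA_tail (u : List Char) (s : Nat) (n : Int) (hs3 : s % 3 = 1)
    (hn : n = (s : Int) + u.length) :
    (PySem.List.enumerate u (s : Int)).flatMap
        (fun p => p.2 :: if p.1 > 0 ∧ PySem.Int.mod p.1 3 = 0 ∧ p.1 < n - 1 then [' '] else [])
      = PySem.Chars.join [' '] (pvGroups3 u) := by
  match u with
  | [] => simp [PySem.List.enumerate_nil, pvGroups3, PySem.Chars.join_nil]
  | [a] =>
    rw [PySem.List.enumerate_cons, PySem.List.enumerate_nil, List.flatMap_cons, List.flatMap_nil]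
    rw [if_neg (by rw [PySem.Int.mod_eq_emod_of_pos (by norm_num)]; omega)]
    simp [pvGroups3, PySem.Chars.join_singleton]
  | [a, b] =>
    rw [PySem.List.enumerate_cons, PySem.List.enumerate_cons, PySem.List.enumerate_nil,
      List.flatMap_cons, List.flatMap_cons, List.flatMap_nil]
    rw [if_neg (by rw [PySem.Int.mod_eq_emod_of_pos (by norm_num)]; omega),
        if_neg (by rw [PySem.Int.mod_eq_emod_of_pos (by norm_num)]; omega)]
    simp [pvGroups3, PySem.Chars.join_singleton]
  | [a, b, c] =>
    have hn' : n = (s : Int) + 3 := by simp at hn; omega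
    rw [PySem.List.enumerate_cons, PySem.List.enumerate_cons, PySem.List.enumerate_cons,
      PySem.List.enumerate_nil, List.flatMap_cons, List.flatMap_cons, List.flatMap_cons,
      List.flatMap_nil]
    rw [if_neg (by rw [PySem.Int.mod_eq_emod_of_pos (by norm_num)]; omega),
        if_neg (by rw [PySem.Int.mod_eq_emod_of_pos (by norm_num)]; omega),
        if_neg (by rw [PySem.Int.mod_eq_emod_of_pos (by norm_num)]; omega)]
    simp [pvGroups3, PySem.Chars.join_singleton]
  | a :: b :: c :: d :: rest =>
    have hn' : n = (s : Int) + 4 + rest.length := by simp at hn; omega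
    have ih := pvProcA_tail (d :: rest) (s + 3) n (by omega) 
      (by simp; omega)
    rw [PySem.List.enumerate_cons, PySem.List.enumerate_cons, PySem.List.enumerate_cons,
      List.flatMap_cons, List.flatMap_cons, List.flatMap_cons]
    rw [if_neg (by rw [PySem.Int.mod_eq_emod_of_pos (by norm_num)]; omega),
        if_neg (by rw [PySem.Int.mod_eq_emod_of_pos (by norm_num)]; omega),
        if_pos (⟨by omega, by rw [PySem.Int.mod_eq_emod_of_pos (by norm_num)]; omega, by
          omega⟩ :
          ((s : Int) + 1 + 1) > 0 ∧ PySem.Int.mod ((s : Int) + 1 + 1) 3 = 0 ∧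
            ((s : Int) + 1 + 1) < n - 1)]
    have harg : ((s : Int) + 1 + 1 + 1) = ((s + 3 : Nat) : Int) := by push_cast; omega
    rw [harg, ih]
    have hne : pvGroups3 (d :: rest) ≠ [] := pvGroups3_ne_nil d rest
    obtain ⟨g, gs, hg⟩ := List.exists_cons_of_ne_nil hne
    have hgroups : pvGroups3 (a :: b :: c :: d :: rest) = [a, b, c] :: pvGroups3 (d :: rest) := by
      simp [pvGroups3]
    rw [hgroups, hg, PySem.Chars.join_cons_cons]
    simp

-- per-word agreement of the two ports
theorem pvProcWord_eq (w : List Char) : pvProcWordA w = pvProcWordB w := by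
  by_cases h : PySem.Chars.len w > 6
  · rw [pvProcWordA, pvProcWordB, if_pos h, if_pos h]
    have hlen : PySem.Chars.len w = (w.length : Int) := by simp [PySem.Chars.len_eq]
    rw [hlen] at h ⊢
    have h7 : 6 < w.length := by exact_mod_cast h
    match w, h7 with
    | c0 :: c1 :: c2 :: c3 :: u, h7 =>
      have hu3 : 3 ≤ u.length := by simp at h7; omega
      -- A side: foldl → flatMap, peel the first four characters
      rw [pvFoldA]
      rw [PySem.List.enumerate_cons, PySem.List.enumerate_cons, PySem.List.enumerate_cons,
        PySem.List.enumerate_cons, List.flatMap_cons, List.flatMap_cons, List.flatMap_cons,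
        List.flatMap_cons]
      rw [if_neg (by rw [PySem.Int.mod_eq_emod_of_pos (by norm_num)]; omega),
          if_neg (by rw [PySem.Int.mod_eq_emod_of_pos (by norm_num)]; omega),
          if_neg (by rw [PySem.Int.mod_eq_emod_of_pos (by norm_num)]; omega),
          if_pos (⟨by omega, by rw [PySem.Int.mod_eq_emod_of_pos (by norm_num)]; omega, by
            simp; omega⟩ :
            ((0 : Int) + 1 + 1 + 1) > 0 ∧ PySem.Int.mod ((0 : Int) + 1 + 1 + 1) 3 = 0 ∧
              ((0 : Int) + 1 + 1 + 1) < ((c0 :: c1 :: c2 :: c3 :: u : List Char).length : Int) - 1)]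
      have harg : ((0 : Int) + 1 + 1 + 1 + 1) = ((4 : Nat) : Int) := by norm_num
      rw [harg, pvProcA_tail u 4 _ (by norm_num) (by simp; omega)]
      -- B side: slices → pvGroups3
      have hsl : PySem.List.slice (c0 :: c1 :: c2 :: c3 :: u) none (some 4)
          = [c0, c1, c2, c3] := by
        rw [PySem.List.slice_to _ (by norm_num)]
        simp [List.take_succ_cons]
      have hrange : (PySem.List.pyRange 4 ((c0 :: c1 :: c2 :: c3 :: u : List Char).length : Int) 3).map
          (fun i => PySem.List.slice (c0 :: c1 :: c2 :: c3 :: u) (some i) (some (i + 3)))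
          = pvGroups3 u := by
        rw [PySem.List.pyRange_of_pos 4 _ (by norm_num), List.map_map]
        have hcount : (if (4 : Int) < ((c0 :: c1 :: c2 :: c3 :: u : List Char).length : Int) then
            ((((c0 :: c1 :: c2 :: c3 :: u : List Char).length : Int) - 4 + 3 - 1) / 3).toNat else 0)
            = (u.length + 2) / 3 := by
          rw [if_pos (by simp; omega)]
          simp; omega
        rw [hcount, ← pvChunksB_eq u]
        apply List.map_congr_left
        intro k _
        simp only [Function.comp_apply]
        rw [PySem.List.slice_toNat _ (by positivity) (by positivity)]
        have h1 : ((4 : Int) + 3 * (k : Int) + 3).toNat - ((4 : Int) + 3 * (k : Int)).toNat = 3 := by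
          omega
        have h2 : ((4 : Int) + 3 * (k : Int)).toNat = 4 + 3 * k := by omega
        rw [h1, h2]
        have h3 : (c0 :: c1 :: c2 :: c3 :: u : List Char).drop (4 + 3 * k) = u.drop (3 * k) := by
          rw [show 4 + 3 * k = 4 + 3 * k from rfl, ← List.drop_drop]
          simp
        rw [h3]
      rw [hrange, hsl]
      have hne : pvGroups3 u ≠ [] := by
        match u, hu3 with
        | x :: r, _ => exact pvGroups3_ne_nil x r
      obtain ⟨g, gs, hg⟩ := List.exists_cons_of_ne_nil hne
      rw [hg, PySem.Chars.join_cons_cons]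
      simp
  · rw [pvProcWordA, pvProcWordB, if_neg h, if_neg h]

-- ===== VERDICT (by name: the statement is the Claim_ definition above) =====
theorem apply_phonics_processing_py_spec : Claim_equal_apply_phonics_processing_py := by
  intro text _
  unfold Spec_apply_phonics_processing_py apply_phonics_processing_py apply_phonics_processing_py_alt
  rw [List.map_congr_left (fun w _ => pvProcWord_eq w)]
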